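-- pv_equiv track=rewrite | github.com/devbali/fairdb-experiments | sosp/64kb_record_read_amp/plotter.py | warmup_cooldown
-- ===== SOURCE A (Python) =====
-- WARMUP = 10
--
-- COOLDOWN = 2
--
-- def warmup_cooldown (idx):
--     lst = list(idx)
--     start = 0
--     end = 0
--     for i in range(len(lst)):
--         seconds = lst[i]
--         if seconds > WARMUP:
--             start = i
--             break
--     for i in range(len(lst)-1, -1, -1):
--         seconds = lst[i]
--         if lst[-1] - seconds > COOLDOWN:
--             end = i
--             break
--     return start, end
-- ===== SOURCE B (Python) =====
-- WARMUP = 10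
--
-- COOLDOWN = 2
--
-- def warmup_cooldown(idx):
--     lst = list(idx)
--     if not lst:
--         return 0, 0
--     last = lst[-1]
--     start = 0
--     end = 0
--     found = False
--     for i, v in enumerate(lst):
--         if not found and v > WARMUP:
--             start = i
--             found = True
--         if last - v > COOLDOWN:
--             end = i
--     return start, end
-- ===== Notes on version B (the rewrite author's own statement) =====
-- stated objective: simpler
-- what changed: Replaced A's two separate break-loops (a forward index scan for start and a backward index scan for end) with an empty-list guard plus one forward enumerate pass keeping (start, found-flag, end); the last forward cooldown match equals A's first backward match.
import Mathlib
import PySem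

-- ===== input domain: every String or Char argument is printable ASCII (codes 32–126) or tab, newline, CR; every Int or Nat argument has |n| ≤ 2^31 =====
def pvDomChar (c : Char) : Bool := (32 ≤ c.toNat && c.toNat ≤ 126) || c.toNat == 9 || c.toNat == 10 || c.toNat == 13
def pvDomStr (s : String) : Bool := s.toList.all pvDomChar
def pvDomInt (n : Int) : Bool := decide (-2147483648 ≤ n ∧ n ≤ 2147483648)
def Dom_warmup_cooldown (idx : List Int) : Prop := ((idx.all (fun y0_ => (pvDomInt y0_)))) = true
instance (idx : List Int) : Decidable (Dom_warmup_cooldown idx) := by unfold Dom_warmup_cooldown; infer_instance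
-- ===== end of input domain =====

-- B replaces A's two separate index scans (one forward with break, one backward with break)
-- by a single forward pass over enumerate with a found-flag (objective: simpler decomposition).

-- ===== PORT A =====
-- first loop: for i in range(len(lst)): if lst[i] > WARMUP: start = i; break
def warmup_cooldown_loop1 (lst : List Int) : List Int → Int
  | [] => 0
  | i :: rest =>
    let seconds := PySem.List.pyGetD lst i 0
    if seconds > 10 then i else warmup_cooldown_loop1 lst rest

-- second loop: for i in range(len(lst)-1, -1, -1): if lst[-1] - lst[i] > COOLDOWN: end = i; break
def warmup_cooldown_loop2 (lst : List Int) : List Int → Int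
  | [] => 0
  | i :: rest =>
    let seconds := PySem.List.pyGetD lst i 0
    if PySem.List.pyGetD lst (-1) 0 - seconds > 2 then i else warmup_cooldown_loop2 lst rest

def warmup_cooldown (idx : List Int) : Int × Int :=
  let lst := idx
  let start := warmup_cooldown_loop1 lst (PySem.List.pyRange 0 (lst.length : Int) 1)
  let end_ := warmup_cooldown_loop2 lst (PySem.List.pyRange ((lst.length : Int) - 1) (-1) (-1))
  (start, end_)

-- ===== PORT B =====
-- loop body of B's single forward pass: state (start, found, end);
-- the first `v > WARMUP` sets start and the flag, every `last - v > COOLDOWN` moves end to i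
def bStep (lastv : Int) (st : Int × Bool × Int) (p : Int × Int) : Int × Bool × Int :=
  let st' := if st.2.1 = false ∧ p.2 > 10 then (p.1, true, st.2.2) else st
  if lastv - p.2 > 2 then (st'.1, st'.2.1, p.1) else st'

def warmup_cooldown_alt (idx : List Int) : Int × Int :=
  match idx.getLast? with
  | none => (0, 0)
  | some lastv =>
    let r := (PySem.List.enumerate idx 0).foldl (bStep lastv) (0, false, 0)
    (r.1, r.2.2)

-- ===== PRECONDITION & SPEC =====
def Spec_warmup_cooldown (idx : List Int) (out : Int × Int) : Prop := out = warmup_cooldown_alt idx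
instance (idx : List Int) (out : Int × Int) : Decidable (Spec_warmup_cooldown idx out) := by unfold Spec_warmup_cooldown; infer_instance

-- ===== CLAIM (what is proved, stated in full; the proofs are below) =====
def Claim_equal_warmup_cooldown : Prop := ∀ (idx : List Int), Dom_warmup_cooldown idx → Spec_warmup_cooldown idx (warmup_cooldown idx)

-- ===== LEMMAS AND PROOFS =====

-- A's break-loops are "first match in the index list, default 0"
theorem loop1_eq_find (lst : List Int) (L : List Int) :
    warmup_cooldown_loop1 lst L
      = ((L.find? (fun i => decide (PySem.List.pyGetD lst i 0 > 10))).getD 0) := by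
  induction L with
  | nil => rfl
  | cons i rest ih =>
    simp only [warmup_cooldown_loop1, List.find?]
    by_cases h : PySem.List.pyGetD lst i 0 > 10 <;> simp [h, ih]

theorem loop2_eq_find (lst : List Int) (L : List Int) :
    warmup_cooldown_loop2 lst L
      = ((L.find? (fun i => decide (PySem.List.pyGetD lst (-1) 0 - PySem.List.pyGetD lst i 0 > 2))).getD 0) := by
  induction L with
  | nil => rfl
  | cons i rest ih =>
    simp only [warmup_cooldown_loop2, List.find?]
    by_cases h : PySem.List.pyGetD lst (-1) 0 - PySem.List.pyGetD lst i 0 > 2 <;> simp [h, ih]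

-- end component of B's fold: last match going forward = first match over the reverse
theorem foldB_end (lastv : Int) (L : List (Int × Int)) :
    ∀ (st : Int × Bool × Int),
      (L.foldl (bStep lastv) st).2.2
        = (((L.reverse.find? (fun p => decide (lastv - p.2 > 2))).map (·.1)).getD st.2.2) := by
  induction L with
  | nil => intro st; rfl
  | cons p rest ih =>
    intro st
    rw [List.foldl_cons, ih]
    have h22 : (bStep lastv st p).2.2 = if lastv - p.2 > 2 then p.1 else st.2.2 := by
      simp only [bStep]
      by_cases hq : lastv - p.2 > 2 <;> by_cases hs : st.2.1 = false ∧ p.2 > 10 <;> simp [hq, hs]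
    rw [h22, List.reverse_cons, List.find?_append]
    cases hf : rest.reverse.find? (fun p => decide (lastv - p.2 > 2)) with
    | some x => simp
    | none =>
      by_cases hq : lastv - p.2 > 2 <;> simp [List.find?, hq]

-- start component of B's fold: first match, frozen once the flag is set
theorem foldB_start (lastv : Int) (L : List (Int × Int)) :
    ∀ (st : Int × Bool × Int),
      (L.foldl (bStep lastv) st).1
        = if st.2.1 then st.1 else (((L.find? (fun p => decide (p.2 > 10))).map (·.1)).getD st.1) := by
  induction L with
  | nil => intro st; cases st.2.1 <;> simp
  | cons p rest ih =>
    intro st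
    rw [List.foldl_cons, ih]
    cases hfl : st.2.1 with
    | true =>
      have h1 : (bStep lastv st p).1 = st.1 := by
        simp only [bStep]
        by_cases hq : lastv - p.2 > 2 <;> simp [hfl, hq]
      have h2 : (bStep lastv st p).2.1 = true := by
        simp only [bStep]
        by_cases hq : lastv - p.2 > 2 <;> simp [hfl, hq]
      simp [h1, h2]
    | false =>
      by_cases hp : p.2 > 10
      · have h1 : (bStep lastv st p).1 = p.1 := by
          simp only [bStep]
          by_cases hq : lastv - p.2 > 2 <;> simp [hfl, hp, hq]
        have h2 : (bStep lastv st p).2.1 = true := by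
          simp only [bStep]
          by_cases hq : lastv - p.2 > 2 <;> simp [hfl, hp, hq]
        simp [h1, h2, List.find?, hp]
      · have h1 : (bStep lastv st p).1 = st.1 := by
          simp only [bStep]
          by_cases hq : lastv - p.2 > 2 <;> simp [hfl, hp, hq]
        have h2 : (bStep lastv st p).2.1 = false := by
          simp only [bStep]
          by_cases hq : lastv - p.2 > 2 <;> simp [hfl, hp, hq]
        simp [h1, h2, List.find?, hp]

-- ===== VERDICT (by name: the statement is the Claim_ definition above) =====
theorem warmup_cooldown_spec : Claim_equal_warmup_cooldown := by
  intro idx _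
  unfold Spec_warmup_cooldown warmup_cooldown warmup_cooldown_alt
  cases h : idx.getLast? with
  | none =>
    have hnil : idx = [] := by simpa using h
    subst hnil
    decide
  | some lastv =>
    have hne : idx ≠ [] := by rintro rfl; simp at h
    have hlast : PySem.List.pyGetD idx (-1) 0 = lastv := by
      rw [PySem.List.pyGetD_neg_one idx 0 hne]
      have := List.getLast?_eq_some_getLast (l := idx) hne
      rw [h] at this; exact (Option.some_inj.mp this).symm
    rw [Prod.mk.injEq]
    refine ⟨?_, ?_⟩
    case _ =>
      -- start components
      rw [loop1_eq_find, foldB_start]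
      simp only [Bool.false_eq_true, if_false]
      rw [PySem.List.enumerate_eq_map_pyRange (d := 0), List.find?_map]
      simp [Function.comp_def]
    case _ =>
      -- end components
      rw [loop2_eq_find, foldB_end]
      have hrange : PySem.List.pyRange ((idx.length : Int) - 1) (-1) (-1)
          = (PySem.List.pyRange 0 (idx.length : Int) 1).reverse := by
        rw [PySem.List.pyRange_neg_one_eq_reverse]
        norm_num
      rw [hrange, PySem.List.enumerate_eq_map_pyRange (d := 0), ← List.map_reverse, List.find?_map]
      simp [Function.comp_def, hlast]
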